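-- pv_equiv track=rewrite | github.com/dosentmatter/elements-of-programming-interviews | epi/utils/itertoolsextra.py | max_diff_reversed
-- ===== SOURCE A (Python) =====
-- def max_diff_reversed(iterable):
--     """
--     Return the reversed max difference by keeping track of the previous
--     maximum. iterable must have >= 2 elements.
--     The reversed max difference equivalent to max_diff(reversed(iterable)),
--     but this does not require reversing the iterable, which might require
--     extra space to reverse if it is not a sequence.
--     max_diff_reversed(reversed(iterable)) is equivalent to
--     max_diff(iterable) but max_diff_reversed just works backwards.
--
--     Uses the previous maximum to calculate a new difference and update
--     the current max difference if it is bigger.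
--     """
--
--     iterable = iter(iterable)
--     try:
--         e0 = next(iterable)
--         e1 = next(iterable)
--     except StopIteration:
--         raise ValueError("iterable must have >= 2 elements.")
--     maxi = max(e0, e1)
--     max_diff = e0 - e1
--     for e in iterable:
--         # find max_diff using PREVIOUS maximum
--         max_diff = max(max_diff, maxi - e)
--         # after finding current max_diff, can update the previous maximum
--         maxi = max(maxi, e)
--     return max_diff
-- ===== SOURCE B (Python) =====
-- def max_diff_reversed(iterable):
--     lst = list(iterable)
--     if len(lst) < 2:
--         raise ValueError("iterable must have >= 2 elements.")
--     prefix_max = lst[:1]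
--     for x in lst[1:]:
--         prefix_max.append(max(prefix_max[-1], x))
--     return max(prefix_max[j - 1] - lst[j] for j in range(1, len(lst)))
-- ===== Notes on version B (the rewrite author's own statement) =====
-- stated objective: alternative
-- what changed: B materialises the iterable, builds an explicit prefix-maximum table in one pass, then does a separate reduction pass taking the max of prefix_max[j-1]-lst[j], instead of A's fused single-pass running-max/running-best loop over the iterator.
import Mathlib
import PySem

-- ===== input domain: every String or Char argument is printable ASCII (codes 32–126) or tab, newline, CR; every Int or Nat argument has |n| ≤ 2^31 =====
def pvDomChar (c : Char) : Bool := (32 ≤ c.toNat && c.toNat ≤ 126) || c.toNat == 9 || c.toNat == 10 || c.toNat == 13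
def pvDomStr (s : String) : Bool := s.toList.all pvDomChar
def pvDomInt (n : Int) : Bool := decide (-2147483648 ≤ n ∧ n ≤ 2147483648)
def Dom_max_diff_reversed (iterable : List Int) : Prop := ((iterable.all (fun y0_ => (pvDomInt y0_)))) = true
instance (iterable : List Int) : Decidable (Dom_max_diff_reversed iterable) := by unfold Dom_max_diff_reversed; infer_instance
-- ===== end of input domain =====

-- B replaces A's fused single-pass running-max/running-best loop by an explicit
-- prefix-maximum table plus a separate max-reduction pass (objective: alternative;
-- same cost). Both raise ValueError on fewer than 2 elements (excluded by Pre_).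

-- ===== PORT A =====
-- A's for-loop over the remaining iterator, state = (max_diff, maxi)
def maxDiffLoop (state : Int × Int) (es : List Int) : Int × Int :=
  es.foldl (fun s e => (max s.1 (s.2 - e), max s.2 e)) state

def max_diff_reversed (iterable : List Int) : Int :=
  match iterable with
  | e0 :: e1 :: rest => (maxDiffLoop (e0 - e1, max e0 e1) rest).1
  | _ => 0  -- Python raises ValueError here; excluded by Pre_

-- ===== PORT B =====
-- Source B's prefix_max-building loop: given the last prefix max m, extend over es
def pfxMaxFrom (m : Int) (es : List Int) : List Int :=
  match es with
  | [] => []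
  | e :: t => max m e :: pfxMaxFrom (max m e) t

def max_diff_reversed_alt (iterable : List Int) : Int :=
  match iterable with
  | e0 :: tl =>
    if tl = [] then 0  -- len < 2: Python raises ValueError; excluded by Pre_
    else
      let prefix_max := e0 :: pfxMaxFrom e0 tl
      let diffs := List.zipWith (· - ·) prefix_max tl  -- prefix_max[j-1] - lst[j]
      match diffs with
      | d :: ds => ds.foldl max d  -- max(generator), nonempty since len ≥ 2
      | [] => 0
  | [] => 0  -- Python raises ValueError here; excluded by Pre_

-- ===== PRECONDITION & SPEC =====
-- Pre_ excludes exactly the inputs with fewer than 2 elements, on which both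
-- programs raise ValueError("iterable must have >= 2 elements.").
def Pre_max_diff_reversed (iterable : List Int) : Prop := 2 ≤ iterable.length
instance (iterable : List Int) : Decidable (Pre_max_diff_reversed iterable) := by
  unfold Pre_max_diff_reversed; infer_instance

def pvWitness_max_diff_reversed : List Int := [3, 1, 4]

def Spec_max_diff_reversed (iterable : List Int) (out : Int) : Prop := out = max_diff_reversed_alt iterable
instance (iterable : List Int) (out : Int) : Decidable (Spec_max_diff_reversed iterable out) := by unfold Spec_max_diff_reversed; infer_instance

-- ===== CLAIM (what is proved, stated in full; the proofs are below) =====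
def Claim_equal_max_diff_reversed : Prop := ∀ (iterable : List Int), Dom_max_diff_reversed iterable → Pre_max_diff_reversed iterable → Spec_max_diff_reversed iterable (max_diff_reversed iterable)

-- ===== LEMMAS AND PROOFS =====

-- the list of differences A's loop takes max over: previous maximum minus element
def gDiffs (m : Int) (es : List Int) : List Int :=
  match es with
  | [] => []
  | e :: t => (m - e) :: gDiffs (max m e) t

-- A's fused loop equals the fold of max over the difference list
theorem maxDiffLoop_fst (es : List Int) : ∀ (d m : Int),
    (maxDiffLoop (d, m) es).1 = (gDiffs m es).foldl max d := by
  induction es with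
  | nil => intro d m; rfl
  | cons e t ih =>
    intro d m
    simpa [maxDiffLoop, gDiffs, List.foldl] using ih (max d (m - e)) (max m e)

-- B's zipped prefix-max differences are exactly A's difference list
theorem zip_pfx_eq_gDiffs (es : List Int) : ∀ (m : Int),
    List.zipWith (· - ·) (m :: pfxMaxFrom m es) es = gDiffs m es := by
  induction es with
  | nil => intro m; rfl
  | cons e t ih =>
    intro m
    simp only [pfxMaxFrom, gDiffs, List.zipWith]
    exact congrArg _ (ih (max m e))

-- ===== VERDICT (by name: the statement is the Claim_ definition above) =====
theorem max_diff_reversed_spec : Claim_equal_max_diff_reversed := by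
  intro iterable _ hpre
  unfold Spec_max_diff_reversed
  match iterable with
  | [] => simp [Pre_max_diff_reversed] at hpre
  | [e0] => simp [Pre_max_diff_reversed] at hpre
  | e0 :: e1 :: rest =>
    simp only [max_diff_reversed, max_diff_reversed_alt]
    rw [maxDiffLoop_fst]
    have h : List.zipWith (· - ·) (e0 :: pfxMaxFrom e0 (e1 :: rest)) (e1 :: rest)
        = (e0 - e1) :: gDiffs (max e0 e1) rest := by
      simp only [pfxMaxFrom, List.zipWith]
      exact congrArg _ (zip_pfx_eq_gDiffs rest (max e0 e1))
    simp [h]
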